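-- pv_equiv track=rewrite | github.com/jackyli0318/SSW-555 | sprint4.py | Multiple_Births
-- ===== SOURCE A (Python) =====
-- def Multiple_Births(tmp_fam, indi_dict):
--     children = tmp_fam['children']
--     d = dict()
--     for child in children:
--         dob = indi_dict[child]['dob']
--         if dob == 'NA':
--             continue
--         if dob in d:
--             d[dob] += 1
--         else:
--             d[dob] = 1
--     for key in d:
--         if d[key] > 5:
--             return False
--     return True
-- ===== SOURCE B (Python) =====
-- def Multiple_Births(tmp_fam, indi_dict):
--     dobs = sorted(d for d in (indi_dict[c]['dob'] for c in tmp_fam['children']) if d != 'NA')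
--     prev = None
--     run = 0
--     for dob in dobs:
--         if dob == prev:
--             run += 1
--         else:
--             prev = dob
--             run = 1
--         if run > 5:
--             return False
--     return True
-- ===== Notes on version B (the rewrite author's own statement) =====
-- stated objective: alternative
-- what changed: Replaces A's hash-count dict plus key scan with a sort of the non-NA birthdates followed by a single prev/run-length scan over consecutive equal dates, returning False as soon as a run exceeds 5.
import Mathlib
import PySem

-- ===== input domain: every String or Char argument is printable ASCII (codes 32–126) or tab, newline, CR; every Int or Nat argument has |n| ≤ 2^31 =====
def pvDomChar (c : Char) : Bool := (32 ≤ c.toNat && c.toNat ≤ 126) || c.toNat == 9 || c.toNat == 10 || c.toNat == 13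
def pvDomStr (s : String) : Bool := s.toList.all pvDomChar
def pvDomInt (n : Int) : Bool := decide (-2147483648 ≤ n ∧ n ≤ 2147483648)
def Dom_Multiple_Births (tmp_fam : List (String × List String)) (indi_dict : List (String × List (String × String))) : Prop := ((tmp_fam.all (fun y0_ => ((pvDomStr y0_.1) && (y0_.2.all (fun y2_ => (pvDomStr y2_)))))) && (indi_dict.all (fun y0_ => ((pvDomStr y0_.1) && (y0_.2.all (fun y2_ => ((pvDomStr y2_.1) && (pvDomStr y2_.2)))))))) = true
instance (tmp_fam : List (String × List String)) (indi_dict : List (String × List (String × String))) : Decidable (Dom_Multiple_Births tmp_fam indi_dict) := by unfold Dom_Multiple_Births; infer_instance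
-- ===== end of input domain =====

-- B replaces A's count-dict-then-key-scan with sort-the-non-NA-dates + one run-length scan (alternative algorithm, not claimed faster).


-- ===== PORT A =====
-- dob of one child: indi_dict[child]['dob'] (defaults only reachable outside Pre_)
def mbDob (indi_dict : List (String × List (String × String))) (child : String) : String :=
  (List.lookup "dob" ((List.lookup child indi_dict).getD [])).getD ""

-- one iteration of A's counting loop (continue on 'NA', then the in-dict branch)
def mbStep (indi_dict : List (String × List (String × String))) (d : PySem.Dict String Int) (child : String) : PySem.Dict String Int :=
  let dob := mbDob indi_dict child
  if dob == "NA" then d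
  else if d.contains dob then d.insert dob (d.getD dob 0 + 1)
  else d.insert dob 1

-- 'for key in d: if d[key] > 5: return False' / 'return True'
def mbCheck (d : PySem.Dict String Int) : List String → Bool
  | [] => true
  | k :: ks => if d.getD k 0 > 5 then false else mbCheck d ks

def Multiple_Births (tmp_fam : List (String × List String)) (indi_dict : List (String × List (String × String))) : Bool :=
  let children := (List.lookup "children" tmp_fam).getD []
  let d := children.foldl (mbStep indi_dict) PySem.Dict.empty
  mbCheck d d.keys

-- ===== PORT B =====
-- the sorted generator argument: dobs of the children, 'NA' skipped
def mbDobs (tmp_fam : List (String × List String)) (indi_dict : List (String × List (String × String))) : List String :=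
  (((List.lookup "children" tmp_fam).getD []).map (mbDob indi_dict)).filter (fun s => s != "NA")

-- the prev/run scan with early False on a run longer than 5
def mbRunScan (prev : Option String) (run : Nat) : List String → Bool
  | [] => true
  | dob :: rest =>
    if some dob == prev then
      if run + 1 > 5 then false else mbRunScan prev (run + 1) rest
    else
      if 1 > 5 then false else mbRunScan (some dob) 1 rest

def Multiple_Births_alt (tmp_fam : List (String × List String)) (indi_dict : List (String × List (String × String))) : Bool :=
  mbRunScan none 0 (PySem.List.sorted (mbDobs tmp_fam indi_dict) (fun x => x) false)

-- ===== PRECONDITION & SPEC =====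
-- Pre_ excludes exactly the KeyError inputs: tmp_fam must have a 'children' entry, and every listed child
-- must appear in indi_dict with a 'dob' entry.
def Pre_Multiple_Births (tmp_fam : List (String × List String)) (indi_dict : List (String × List (String × String))) : Prop :=
  (List.lookup "children" tmp_fam).isSome = true ∧
  ∀ c ∈ (List.lookup "children" tmp_fam).getD [],
    (List.lookup c indi_dict).isSome = true ∧
    (List.lookup "dob" ((List.lookup c indi_dict).getD [])).isSome = true
instance (tmp_fam : List (String × List String)) (indi_dict : List (String × List (String × String))) : Decidable (Pre_Multiple_Births tmp_fam indi_dict) := by unfold Pre_Multiple_Births; infer_instance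

def pvWitness_Multiple_Births : (List (String × List String)) × (List (String × List (String × String))) :=
  ([("children", ["c1", "c2"])], [("c1", [("dob", "1 JAN 2000")]), ("c2", [("dob", "NA")])])

def Spec_Multiple_Births (tmp_fam : List (String × List String)) (indi_dict : List (String × List (String × String))) (out : Bool) : Prop := out = Multiple_Births_alt tmp_fam indi_dict
instance (tmp_fam : List (String × List String)) (indi_dict : List (String × List (String × String))) (out : Bool) : Decidable (Spec_Multiple_Births tmp_fam indi_dict out) := by unfold Spec_Multiple_Births; infer_instance

-- ===== CLAIM (what is proved, stated in full; the proofs are below) =====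
def Claim_equal_Multiple_Births : Prop := ∀ (tmp_fam : List (String × List String)) (indi_dict : List (String × List (String × String))), Dom_Multiple_Births tmp_fam indi_dict → Pre_Multiple_Births tmp_fam indi_dict → Spec_Multiple_Births tmp_fam indi_dict (Multiple_Births tmp_fam indi_dict)

-- ===== LEMMAS AND PROOFS =====

-- A's counting loop is exactly the insert-getD-add-one counter loop over the filtered dob list
lemma mbFold_eq_counter (indi_dict : List (String × List (String × String))) :
    ∀ (children : List String) (d0 : PySem.Dict String Int),
      children.foldl (mbStep indi_dict) d0
      = ((children.map (mbDob indi_dict)).filter (fun s => s != "NA")).foldl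
          (fun d x => d.insert x (d.getD x 0 + 1)) d0 := by
  intro children
  induction children with
  | nil => intro d0; rfl
  | cons c cs ih =>
    intro d0
    rw [List.foldl_cons, List.map_cons, List.filter_cons]
    by_cases hna : mbDob indi_dict c = "NA"
    · have h1 : (mbDob indi_dict c != "NA") = false := by simp [hna]
      have h2 : mbStep indi_dict d0 c = d0 := by simp [mbStep, hna]
      rw [h1, h2, ih]
      simp
    · have h1 : (mbDob indi_dict c != "NA") = true := by simp [hna]
      have h2 : mbStep indi_dict d0 c
          = d0.insert (mbDob indi_dict c) (d0.getD (mbDob indi_dict c) 0 + 1) := by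
        by_cases hc : d0.contains (mbDob indi_dict c) = true
        · simp [mbStep, hna, hc]
        · have h0 : d0.getD (mbDob indi_dict c) 0 = 0 :=
            PySem.Dict.getD_of_not_contains _ _ (by simpa using hc)
          simp [mbStep, hna, hc, h0]
      rw [h1, if_pos rfl, h2, List.foldl_cons, ih]

-- the key-scan returns true iff every stored count is ≤ 5
lemma mbCheck_eq_all (d : PySem.Dict String Int) :
    ∀ ks : List String, (mbCheck d ks = true ↔ ∀ k ∈ ks, d.getD k 0 ≤ 5) := by
  intro ks
  induction ks with
  | nil => simp [mbCheck]
  | cons k ks ih =>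
    by_cases h : d.getD k 0 > 5
    · simp only [mbCheck, if_pos h]
      constructor
      · intro hf; cases hf
      · intro hall
        exact absurd (hall k (by simp)) (by omega)
    · simp only [mbCheck, if_neg h, ih]
      constructor
      · intro hall y hy
        rcases List.mem_cons.mp hy with hy | hy
        · subst hy; omega
        · exact hall y hy
      · intro hall y hy
        exact hall y (List.mem_cons_of_mem _ hy)

-- the run scan on a nondecreasing list, started inside a run of p already r long (r ≤ 5)
lemma mbRunScan_go (xs : List String) :
    ∀ (p : String) (r : Nat), xs.Pairwise (· ≤ ·) → (∀ x ∈ xs, p ≤ x) → r ≤ 5 →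
    (mbRunScan (some p) r xs = true ↔
      (r + xs.count p ≤ 5 ∧ ∀ x ∈ xs, x ≠ p → xs.count x ≤ 5)) := by
  induction xs with
  | nil => intro p r _ _ hr; simp [mbRunScan, hr]
  | cons x xs ih =>
    intro p r hsort hge hr
    have hsort' : xs.Pairwise (· ≤ ·) := hsort.tail
    have hheads : ∀ y ∈ xs, x ≤ y := fun y hy => (List.pairwise_cons.mp hsort).1 y hy
    by_cases hxp : x = p
    · subst hxp
      have hcx : (x :: xs).count x = xs.count x + 1 := by simp
      by_cases h6 : r + 1 > 5
      · have hfalse : mbRunScan (some x) r (x :: xs) = false := by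
          simp [mbRunScan, h6]
        rw [hfalse]
        constructor
        · intro h; cases h
        · rintro ⟨h1, _⟩; rw [hcx] at h1; omega
      · have heq : mbRunScan (some x) r (x :: xs) = mbRunScan (some x) (r + 1) xs := by
          simp [mbRunScan, h6]
        rw [heq, ih x (r + 1) hsort' hheads (by omega), hcx]
        constructor
        · rintro ⟨h1, h2⟩
          refine ⟨by omega, ?_⟩
          intro y hy hyx
          rcases List.mem_cons.mp hy with hy | hy
          · exact absurd hy hyx
          · have := h2 y hy hyx
            have hxy : ¬ x = y := fun h => hyx h.symm
            have hcc : (x :: xs).count y = xs.count y := by simp [hxy]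
            omega
        · rintro ⟨h1, h2⟩
          refine ⟨by omega, ?_⟩
          intro y hy hyx
          have := h2 y (List.mem_cons_of_mem _ hy) hyx
          have hxy : ¬ x = y := fun h => hyx h.symm
          have hcc : (x :: xs).count y = xs.count y := by simp [hxy]
          omega
    · have hplt : p < x := lt_of_le_of_ne (hge x (by simp)) fun h => hxp h.symm
      have heq : mbRunScan (some p) r (x :: xs) = mbRunScan (some x) 1 xs := by
        simp [mbRunScan, hxp]
      have hpnot : p ∉ x :: xs := by
        intro hmem
        rcases List.mem_cons.mp hmem with h | h
        · exact hxp h.symm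
        · exact absurd (hheads p h) (not_le.mpr hplt)
      have hpcount : (x :: xs).count p = 0 := List.count_eq_zero.mpr hpnot
      rw [heq, ih x 1 hsort' hheads (by omega)]
      constructor
      · rintro ⟨h1, h2⟩
        refine ⟨by rw [hpcount]; omega, ?_⟩
        intro y hy _
        rcases List.mem_cons.mp hy with rfl | hy
        · have hcy : (y :: xs).count y = xs.count y + 1 := by simp
          omega
        · by_cases hyx : y = x
          · subst hyx
            have hcy : (y :: xs).count y = xs.count y + 1 := by simp
            omega
          · have := h2 y hy hyx
            have hxy : ¬ x = y := fun h => hyx h.symm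
            have hcc : (x :: xs).count y = xs.count y := by simp [hxy]
            omega
      · rintro ⟨_, h2⟩
        have hx5 : (x :: xs).count x ≤ 5 := h2 x (by simp) hxp
        have hcx : (x :: xs).count x = xs.count x + 1 := by simp
        refine ⟨by omega, ?_⟩
        intro y hy hyx
        have hyp : y ≠ p := by
          intro h; subst h; exact hpnot (List.mem_cons_of_mem _ hy)
        have := h2 y (List.mem_cons_of_mem _ hy) hyp
        have hxy : ¬ x = y := fun h => hyx h.symm
        have hcc : (x :: xs).count y = xs.count y := by simp [hxy]
        omega

-- the full scan from (None, 0): true iff no date occurs more than 5 times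
lemma mbRunScan_none (xs : List String) (hsort : xs.Pairwise (· ≤ ·)) :
    (mbRunScan none 0 xs = true ↔ ∀ x ∈ xs, xs.count x ≤ 5) := by
  cases xs with
  | nil => simp [mbRunScan]
  | cons x xs =>
    have heq : mbRunScan none 0 (x :: xs) = mbRunScan (some x) 1 xs := by
      simp [mbRunScan]
    rw [heq, mbRunScan_go xs x 1 hsort.tail
      (fun y hy => (List.pairwise_cons.mp hsort).1 y hy) (by omega)]
    have hcx : (x :: xs).count x = xs.count x + 1 := by simp
    constructor
    · rintro ⟨h1, h2⟩ y hy
      rcases List.mem_cons.mp hy with hy | hy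
      · subst hy; omega
      · by_cases hyx : y = x
        · subst hyx; omega
        · have := h2 y hy hyx
          have hxy : ¬ x = y := fun h => hyx h.symm
          have hcc : (x :: xs).count y = xs.count y := by simp [hxy]
          omega
    · intro h
      have hx := h x (by simp)
      refine ⟨by omega, ?_⟩
      intro y hy hyx
      have := h y (List.mem_cons_of_mem _ hy)
      have hxy : ¬ x = y := fun h => hyx h.symm
      have hcc : (x :: xs).count y = xs.count y := by simp [hxy]
      omega

-- ===== VERDICT (by name: the statement is the Claim_ definition above) =====
theorem Multiple_Births_spec : Claim_equal_Multiple_Births := by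
  intro tmp_fam indi_dict _ _
  unfold Spec_Multiple_Births Multiple_Births Multiple_Births_alt
  set L := mbDobs tmp_fam indi_dict with hL
  have key : ((List.lookup "children" tmp_fam).getD []).foldl (mbStep indi_dict) PySem.Dict.empty
      = PySem.Dict.counter L := by
    rw [mbFold_eq_counter, PySem.Dict.foldl_insert_getD_add_one_eq_counter]
    rfl
  simp only [key]
  have hA : (mbCheck (PySem.Dict.counter L) (PySem.Dict.counter L).keys = true ↔
      ∀ x ∈ L, L.count x ≤ 5) := by
    rw [mbCheck_eq_all]
    constructor
    · intro h x hx
      have hk : x ∈ (PySem.Dict.counter L).keys := by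
        rw [PySem.Dict.keys_counter]
        exact (PySem.Set.mem_ofList _ _).mpr hx
      have := h x hk
      rw [PySem.Dict.getD_counter] at this
      exact_mod_cast this
    · intro h k hk
      rw [PySem.Dict.keys_counter, PySem.Set.mem_ofList] at hk
      rw [PySem.Dict.getD_counter]
      exact_mod_cast h k hk
  have hperm : (PySem.List.sorted L (fun x => x) false).Perm L := PySem.List.sorted_perm L _ _
  have hsort : (PySem.List.sorted L (fun x => x) false).Pairwise (· ≤ ·) := by
    have := PySem.List.sorted_pairwise L (fun x => x)
    simpa using this
  have hB : (mbRunScan none 0 (PySem.List.sorted L (fun x => x) false) = true ↔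
      ∀ x ∈ L, L.count x ≤ 5) := by
    rw [mbRunScan_none _ hsort]
    constructor
    · intro h x hx
      have := h x (hperm.mem_iff.mpr hx)
      rwa [hperm.count_eq] at this
    · intro h x hx
      rw [hperm.count_eq]
      exact h x (hperm.mem_iff.mp hx)
  exact Bool.eq_iff_iff.mpr (hA.trans hB.symm)
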